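-- pv_equiv track=rewrite | github.com/azwpayne/crypt | src/crypt/encrypt/symmetric_encrypt/stream_cipher/simple_substitution.py | generate_key_from_keyword
-- ===== SOURCE A (Python) =====
-- from string import ascii_uppercase
--
-- def generate_key_from_keyword(keyword: str) -> str:
--   """
--   从关键词生成密钥
--
--   关键词在前，剩余字母按字母表顺序排列
--
--   参数:
--       keyword: 关键词
--
--   返回:
--       生成的密钥
--
--   示例:
--       >>> generate_key_from_keyword("KEYWORD")
--       'KEYWORDABCFGHILMNPQSTUVXZ'
--   """
--   # 清理关键词
--   cleaned = "".join(c.upper() for c in keyword if c.isascii() and c.isalpha())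
--
--   # 去重但保持顺序
--   seen = set()
--   unique_keyword = []
--   for c in cleaned:
--     if c not in seen:
--       seen.add(c)
--       unique_keyword.append(c)
--
--   # 添加剩余字母
--   remaining = [c for c in ascii_uppercase if c not in seen]
--
--   return "".join(unique_keyword) + "".join(remaining)
-- ===== SOURCE B (Python) =====
-- from string import ascii_uppercase
--
-- def generate_key_from_keyword(keyword: str) -> str:
--     cleaned = "".join(c.upper() for c in keyword if c.isascii() and c.isalpha())
--     cleaned_list = list(cleaned)
--
--     def rank(c):
--         # letters of the keyword rank by first occurrence; the rest rank
--         # after them, in alphabetical order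
--         try:
--             return cleaned_list.index(c)
--         except ValueError:
--             return len(cleaned_list) + ord(c)
--
--     return "".join(sorted(ascii_uppercase, key=rank))
-- ===== Notes on version B (the rewrite author's own statement) =====
-- stated objective: alternative
-- what changed: Instead of A's two-phase construction (explicit seen-set dedup loop over the cleaned keyword, then a comprehension of the remaining alphabet), B sorts the fixed 26-letter alphabet by a rank function: first-occurrence index in the cleaned keyword, else keyword length + ord(c); keyword letters thus come first in first-occurrence order and the rest follow alphabetically.
import Mathlib
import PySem

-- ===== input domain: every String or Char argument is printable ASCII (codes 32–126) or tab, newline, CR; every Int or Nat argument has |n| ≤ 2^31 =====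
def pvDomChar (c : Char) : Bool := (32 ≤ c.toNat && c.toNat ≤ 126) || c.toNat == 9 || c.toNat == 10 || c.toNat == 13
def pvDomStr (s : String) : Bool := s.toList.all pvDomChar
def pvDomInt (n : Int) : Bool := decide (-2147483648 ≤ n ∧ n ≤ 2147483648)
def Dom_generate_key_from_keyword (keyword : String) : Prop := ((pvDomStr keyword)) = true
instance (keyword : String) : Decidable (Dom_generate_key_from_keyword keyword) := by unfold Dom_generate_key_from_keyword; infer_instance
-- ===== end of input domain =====

-- B replaces A's dedup-then-remainder construction by SORTING the 26-letter alphabet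
-- under a rank function (first occurrence in the cleaned keyword, else after it
-- alphabetically); same observable behaviour, a genuinely different algorithm.

-- string.ascii_uppercase
def asciiUppercase : List Char := "ABCDEFGHIJKLMNOPQRSTUVWXYZ".toList

-- ===== PORT A =====
def generate_key_from_keyword (keyword : String) : String :=
  -- cleaned = "".join(c.upper() for c in keyword if c.isascii() and c.isalpha())
  let cleaned : List Char :=
    (keyword.toList.filter (fun c => decide (c.toNat ≤ 127) && PySem.Chars.isalpha c)).map
      PySem.Chars.upperChar
  -- seen = set(); unique_keyword = []; for c in cleaned: …
  let st : PySem.Set Char × List Char :=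
    cleaned.foldl
      (fun (st : PySem.Set Char × List Char) c =>
        if PySem.Set.contains st.1 c then st
        else (PySem.Set.add st.1 c, st.2 ++ [c]))
      ([], [])
  -- remaining = [c for c in ascii_uppercase if c not in seen]
  let remaining : List Char := asciiUppercase.filter (fun c => !(PySem.Set.contains st.1 c))
  String.ofList (st.2 ++ remaining)

-- ===== PORT B =====
-- rank(c): cleaned_list.index(c), or len(cleaned_list) + ord(c) on ValueError
def rankKey (cleaned : List Char) (c : Char) : Int :=
  match PySem.List.index? cleaned c with
  | some i => (i : Int)
  | none => (cleaned.length : Int) + (c.toNat : Int)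

def generate_key_from_keyword_alt (keyword : String) : String :=
  let cleaned : List Char :=
    (keyword.toList.filter (fun c => decide (c.toNat ≤ 127) && PySem.Chars.isalpha c)).map
      PySem.Chars.upperChar
  -- "".join(sorted(ascii_uppercase, key=rank))
  String.ofList (PySem.List.sorted asciiUppercase (rankKey cleaned))

-- ===== PRECONDITION & SPEC =====
def Spec_generate_key_from_keyword (keyword : String) (out : String) : Prop := out = generate_key_from_keyword_alt keyword
instance (keyword : String) (out : String) : Decidable (Spec_generate_key_from_keyword keyword out) := by unfold Spec_generate_key_from_keyword; infer_instance

-- ===== CLAIM (what is proved, stated in full; the proofs are below) =====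
def Claim_equal_generate_key_from_keyword : Prop := ∀ (keyword : String), Dom_generate_key_from_keyword keyword → Spec_generate_key_from_keyword keyword (generate_key_from_keyword keyword)

-- ===== LEMMAS AND PROOFS =====

-- A's loop keeps seen and unique_keyword equal (as lists), both evolving by Set.add.
theorem foldA_eq (cs : List Char) (s : List Char) :
    cs.foldl
      (fun (st : PySem.Set Char × List Char) c =>
        if PySem.Set.contains st.1 c then st
        else (PySem.Set.add st.1 c, st.2 ++ [c]))
      (s, s)
    = (cs.foldl PySem.Set.add s, cs.foldl PySem.Set.add s) := by
  induction cs generalizing s with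
  | nil => rfl
  | cons c cs ih =>
    by_cases h : c ∈ s
    · have hs : PySem.Set.add s c = s := by simp [PySem.Set.add, PySem.Set.contains, h]
      simpa [PySem.Set.contains, h, hs] using ih s
    · have hs : PySem.Set.add s c = s ++ [c] := by simp [PySem.Set.add, PySem.Set.contains, h]
      simpa [PySem.Set.contains, h, hs] using ih (s ++ [c])

-- folding Set.add appends the dedup of the new elements not already present
theorem foldl_add_eq (cs : List Char) (s : List Char) :
    cs.foldl PySem.Set.add s
      = s ++ (PySem.List.dedup cs).filter (fun x => !(PySem.Set.contains s x)) := by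
  induction cs generalizing s with
  | nil => simp [PySem.List.dedup]
  | cons c cs ih =>
    have hdc : PySem.List.dedup (c :: cs)
        = c :: (PySem.List.dedup cs).filter (fun x => !decide (x = c)) := by
      have h1 : PySem.List.dedup (c :: cs) = cs.foldl PySem.Set.add [c] := by
        simp [PySem.List.dedup_eq_ofList, PySem.Set.ofList_eq_foldl, PySem.Set.add,
          PySem.Set.contains]
      rw [h1, ih]
      simp [PySem.Set.contains]
    by_cases h : c ∈ s
    · have hs : PySem.Set.add s c = s := by simp [PySem.Set.add, PySem.Set.contains, h]
      rw [List.foldl_cons, hs, ih, hdc]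
      have : (PySem.Set.contains s c) = true := by simp [PySem.Set.contains, h]
      simp only [List.filter_cons, this, Bool.not_true, List.filter_filter]
      congr 1
      apply List.filter_congr
      intro x _
      by_cases hx : x = c
      · subst hx; simp [PySem.Set.contains, h]
      · simp [hx]
    · have hs : PySem.Set.add s c = s ++ [c] := by simp [PySem.Set.add, PySem.Set.contains, h]
      rw [List.foldl_cons, hs, ih, hdc]
      have hcs : (PySem.Set.contains s c) = false := by simp [PySem.Set.contains, h]
      simp only [List.filter_cons, hcs, Bool.not_false, List.filter_filter, List.append_assoc,
        List.singleton_append]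
      congr 2
      apply List.filter_congr
      intro x _
      by_cases hx : x = c
      · subst hx; simp [PySem.Set.contains, h]
      · simp [hx, PySem.Set.contains]

theorem dedup_cons (c : Char) (cs : List Char) :
    PySem.List.dedup (c :: cs)
      = c :: (PySem.List.dedup cs).filter (fun x => !decide (x = c)) := by
  have h1 : PySem.List.dedup (c :: cs) = cs.foldl PySem.Set.add [c] := by
    simp [PySem.List.dedup_eq_ofList, PySem.Set.ofList_eq_foldl, PySem.Set.add, PySem.Set.contains]
  rw [h1, foldl_add_eq]
  simp [PySem.Set.contains]

-- a member's rank is its first-occurrence index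
theorem idxOf?_of_mem (cs : List Char) (a : Char) (h : a ∈ cs) :
    List.idxOf? a cs = some (cs.idxOf a) := by
  cases hx : List.idxOf? a cs with
  | none => exact absurd (List.idxOf?_eq_none_iff.mp hx) (by simpa using h)
  | some i => rw [List.idxOf_eq_getD_idxOf?, hx]; rfl

theorem rank_of_mem (cs : List Char) (a : Char) (h : a ∈ cs) :
    rankKey cs a = (cs.idxOf a : Int) := by
  simp [rankKey, PySem.List.index?_eq_idxOf?, idxOf?_of_mem cs a h]

theorem rank_of_not_mem (cs : List Char) (a : Char) (h : a ∉ cs) :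
    rankKey cs a = (cs.length : Int) + (a.toNat : Int) := by
  simp [rankKey, PySem.List.index?_eq_idxOf?, List.idxOf?_eq_none_iff.mpr h]

-- dedup lists elements in order of first occurrence: idxOf is strictly increasing along it
theorem dedup_idxOf_pairwise (cs : List Char) :
    (PySem.List.dedup cs).Pairwise (fun a b => cs.idxOf a < cs.idxOf b) := by
  induction cs with
  | nil => simp [PySem.List.dedup]
  | cons c cs ih =>
    rw [dedup_cons]
    refine List.Pairwise.cons ?_ ?_
    · intro b hb
      have hbne : b ≠ c := by
        have := List.of_mem_filter hb
        simpa using this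
      simp [List.idxOf_cons_ne _ (fun h => hbne h.symm), List.idxOf_cons_self]
    · refine List.Pairwise.imp_of_mem ?_ (List.Pairwise.filter _ ih)
      intro a b ha hb hab
      have hane : a ≠ c := by have := List.of_mem_filter ha; simpa using this
      have hbne : b ≠ c := by have := List.of_mem_filter hb; simpa using this
      simp [List.idxOf_cons_ne _ (fun h => hane h.symm),
        List.idxOf_cons_ne _ (fun h => hbne h.symm)]
      omega

-- ASCII alphabetic chars uppercase into A–Z (checked over all 128 ASCII codes)
theorem upper_mem_alphabet (c : Char) (h1 : c.toNat ≤ 127) (h2 : PySem.Chars.isalpha c = true) :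
    PySem.Chars.upperChar c ∈ asciiUppercase := by
  have key : ∀ n : Fin 128, PySem.Chars.isalpha (Char.ofNat n.val) = true →
      PySem.Chars.upperChar (Char.ofNat n.val) ∈ asciiUppercase := by decide
  have := key ⟨c.toNat, by omega⟩ (by rw [Char.ofNat_toNat]; exact h2)
  rwa [Char.ofNat_toNat] at this

theorem cleaned_subset_alphabet (ks : List Char) (x : Char)
    (hx : x ∈ (ks.filter (fun c => decide (c.toNat ≤ 127) && PySem.Chars.isalpha c)).map
      PySem.Chars.upperChar) : x ∈ asciiUppercase := by
  rcases List.mem_map.mp hx with ⟨c, hc, rfl⟩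
  have := List.of_mem_filter hc
  simp only [Bool.and_eq_true, decide_eq_true_eq] at this
  exact upper_mem_alphabet c this.1 this.2

theorem alphabet_nodup : asciiUppercase.Nodup := by decide

theorem alphabet_toNat_pairwise : asciiUppercase.Pairwise (fun a b => a.toNat < b.toNat) := by
  decide

-- the core fact: A's output list is exactly the alphabet sorted by rankKey
theorem key_sorted (cl : List Char) (hsub : ∀ x ∈ cl, x ∈ asciiUppercase) :
    PySem.List.sorted asciiUppercase (rankKey cl)
      = PySem.List.dedup cl
        ++ asciiUppercase.filter (fun c => !(PySem.Set.contains (PySem.List.dedup cl) c)) := by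
  have hmemdd : ∀ x, x ∈ PySem.List.dedup cl ↔ x ∈ cl := fun x => PySem.List.mem_dedup cl x
  have hcont : ∀ x, PySem.Set.contains (PySem.List.dedup cl) x = decide (x ∈ PySem.List.dedup cl) := by
    intro x; simp [PySem.Set.contains]
  apply PySem.List.sorted_eq_of_perm_of_pairwise_lt
  · -- permutation of the alphabet
    rw [List.perm_ext_iff_of_nodup
      (List.Nodup.append (PySem.List.nodup_dedup cl) (List.Nodup.filter _ alphabet_nodup)
        (by
          intro x hx hy
          have := List.of_mem_filter hy
          simp at this
          exact this ((PySem.List.mem_dedup cl x).mp hx)))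
      alphabet_nodup]
    intro a
    constructor
    · intro ha
      rcases List.mem_append.mp ha with h | h
      · exact hsub a ((hmemdd a).mp h)
      · exact List.mem_of_mem_filter h
    · intro ha
      by_cases h : a ∈ PySem.List.dedup cl
      · exact List.mem_append.mpr (Or.inl h)
      · have hnc : a ∉ cl := fun hc => h ((hmemdd a).mpr hc)
        exact List.mem_append.mpr (Or.inr (List.mem_filter.mpr ⟨ha, by simpa using hnc⟩))
  · -- ranks strictly increase along A's output
    rw [List.pairwise_append]
    refine ⟨?_, ?_, ?_⟩
    · refine List.Pairwise.imp_of_mem ?_ (dedup_idxOf_pairwise cl)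
      intro a b ha hb hab
      rw [rank_of_mem cl a ((hmemdd a).mp ha), rank_of_mem cl b ((hmemdd b).mp hb)]
      exact_mod_cast hab
    · refine List.Pairwise.imp_of_mem ?_ (List.Pairwise.filter _ alphabet_toNat_pairwise)
      intro a b ha hb hab
      have hna : a ∉ cl := fun h => by
        have := List.of_mem_filter ha; simp at this; exact this h
      have hnb : b ∉ cl := fun h => by
        have := List.of_mem_filter hb; simp at this; exact this h
      rw [rank_of_not_mem cl a hna, rank_of_not_mem cl b hnb]
      omega
    · intro a ha b hb
      have hma : a ∈ cl := (hmemdd a).mp ha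
      have hnb : b ∉ cl := fun h => by
        have := List.of_mem_filter hb; simp at this; exact this h
      rw [rank_of_mem cl a hma, rank_of_not_mem cl b hnb]
      have := List.idxOf_lt_length_of_mem hma
      omega

-- ===== VERDICT (by name: the statement is the Claim_ definition above) =====
theorem generate_key_from_keyword_spec : Claim_equal_generate_key_from_keyword := by
  intro keyword _
  unfold Spec_generate_key_from_keyword generate_key_from_keyword generate_key_from_keyword_alt
  simp only [foldA_eq]
  have hdd : ((keyword.toList.filter (fun c => decide (c.toNat ≤ 127) && PySem.Chars.isalpha c)).map
      PySem.Chars.upperChar).foldl PySem.Set.add ([] : List Char)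
      = PySem.List.dedup ((keyword.toList.filter
          (fun c => decide (c.toNat ≤ 127) && PySem.Chars.isalpha c)).map PySem.Chars.upperChar) := by
    simp [PySem.List.dedup_eq_ofList, PySem.Set.ofList_eq_foldl]
  rw [hdd, key_sorted _ (cleaned_subset_alphabet keyword.toList)]
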